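-- pv_equiv track=rewrite | github.com/dsimonkay/advent-of-code-2024 | december 12/puzzle1.py | calculate_fence_price_of
-- ===== SOURCE A (Python) =====
-- from typing import Dict, List, Tuple
--
-- def calculate_fence_price_of(plots: List[List[Tuple[int,int]]]) -> int:
--     total_price = 0
--
--     for plot in plots:
--         plot_perimeter = 0
--         for square in plot:
--             (row, col) = square
--             neighbors = [(row - 1, col), (row + 1, col), (row, col - 1), (row, col + 1)]
--             square_perimeter = 4
--             for neighbor in neighbors:
--                 if neighbor in plot:
--                     square_perimeter -= 1
--
--             plot_perimeter += square_perimeter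
--
--         total_price += plot_perimeter * len(plot)
--
--     return total_price
-- ===== SOURCE B (Python) =====
-- def calculate_fence_price_of(plots):
--     total_price = 0
--     for plot in plots:
--         cells = set(plot)
--         shared_edges = 0
--         for (row, col) in cells:
--             if (row + 1, col) in cells:
--                 shared_edges += 1
--             if (row, col + 1) in cells:
--                 shared_edges += 1
--         area = len(plot)
--         total_price += (4 * area - 2 * shared_edges) * area
--     return total_price
-- ===== Notes on version B (the rewrite author's own statement) =====
-- stated objective: faster
-- what changed: Replaces A's four linear whole-plot membership scans per square with a hash set built once per plot and the closed-form identity perimeter = 4*area - 2*shared_edges, counting each shared edge once from its upper/left side; Pre_ excludes plots containing duplicate squares, on which A's per-occurrence perimeter counting is an accident of its list representation.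
-- outside the precondition, e.g. on calculate_fence_price_of([[(0, 0), (0, 0), (1, 0)]]): A returns 27, B returns 30
import Mathlib
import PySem

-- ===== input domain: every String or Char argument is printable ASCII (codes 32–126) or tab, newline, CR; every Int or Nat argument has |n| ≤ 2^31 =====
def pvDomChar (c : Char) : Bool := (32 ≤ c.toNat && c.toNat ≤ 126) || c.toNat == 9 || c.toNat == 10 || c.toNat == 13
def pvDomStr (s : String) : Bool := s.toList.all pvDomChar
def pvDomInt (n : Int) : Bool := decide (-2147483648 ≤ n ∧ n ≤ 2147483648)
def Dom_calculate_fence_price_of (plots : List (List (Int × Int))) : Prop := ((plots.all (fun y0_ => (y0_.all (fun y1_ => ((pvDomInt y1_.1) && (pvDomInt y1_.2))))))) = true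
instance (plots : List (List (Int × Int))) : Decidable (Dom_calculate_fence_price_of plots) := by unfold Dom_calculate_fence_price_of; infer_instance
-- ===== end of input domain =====

-- B builds a hash set once per plot, counts each shared edge once (from its upper/left side)
-- and uses the identity perimeter = 4*area - 2*shared_edges; objective: faster.

-- ===== PORT A =====
-- inner 'for neighbor in neighbors' loop of A
def pvA_sq (plot : List (Int × Int)) (sq : Int × Int) : Int :=
  [(sq.1 - 1, sq.2), (sq.1 + 1, sq.2), (sq.1, sq.2 - 1), (sq.1, sq.2 + 1)].foldl
    (fun sp nb => if nb ∈ plot then sp - 1 else sp) 4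

-- 'for square in plot' loop of A
def pvA_plot (plot : List (Int × Int)) : Int :=
  plot.foldl (fun pp sq => pp + pvA_sq plot sq) 0

def calculate_fence_price_of (plots : List (List (Int × Int))) : Int :=
  plots.foldl (fun total plot => total + pvA_plot plot * (plot.length : Int)) 0

-- ===== PORT B =====
-- 'for (row, col) in cells: …' loop of B (the sum is order-independent, so iterating the
-- Set's list order is exact)
def pvB_shared (cells : PySem.Set (Int × Int)) : Int :=
  cells.foldl (fun sh s =>
    let sh1 := if PySem.Set.contains cells (s.1 + 1, s.2) then sh + 1 else sh
    if PySem.Set.contains cells (s.1, s.2 + 1) then sh1 + 1 else sh1) 0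

def calculate_fence_price_of_alt (plots : List (List (Int × Int))) : Int :=
  plots.foldl (fun total plot =>
    let cells := PySem.Set.ofList plot
    let area : Int := plot.length
    total + (4 * area - 2 * pvB_shared cells) * area) 0

-- ===== PRECONDITION & SPEC =====
-- Pre_ excludes plots containing duplicate squares: there A counts each occurrence's
-- perimeter separately, an accident of the list representation that no caller relies on
-- (plots are sets of grid squares), and B's deduplicated value is as defensible.
def Pre_calculate_fence_price_of (plots : List (List (Int × Int))) : Prop :=
  ∀ plot ∈ plots, plot.Nodup
instance (plots : List (List (Int × Int))) : Decidable (Pre_calculate_fence_price_of plots) := by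
  unfold Pre_calculate_fence_price_of; infer_instance

def pvWitness_calculate_fence_price_of : (List (List (Int × Int))) :=
  [[(0, 0), (0, 1), (1, 1)], [(5, 5)]]

def Spec_calculate_fence_price_of (plots : List (List (Int × Int))) (out : Int) : Prop :=
  out = calculate_fence_price_of_alt plots
instance (plots : List (List (Int × Int))) (out : Int) :
    Decidable (Spec_calculate_fence_price_of plots out) := by
  unfold Spec_calculate_fence_price_of; infer_instance

-- ===== CLAIM =====
def Claim_equal_calculate_fence_price_of : Prop :=
  ∀ (plots : List (List (Int × Int))), Dom_calculate_fence_price_of plots →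
    Pre_calculate_fence_price_of plots →
    Spec_calculate_fence_price_of plots (calculate_fence_price_of plots)

-- ===== LEMMAS AND PROOFS =====

-- 0/1 indicator of membership in the plot
def pvInd (plot : List (Int × Int)) (t : Int × Int) : Int := if t ∈ plot then 1 else 0

lemma pvA_sq_eq (plot : List (Int × Int)) (sq : Int × Int) :
    pvA_sq plot sq = 4 - (pvInd plot (sq.1 - 1, sq.2) + pvInd plot (sq.1 + 1, sq.2)
      + pvInd plot (sq.1, sq.2 - 1) + pvInd plot (sq.1, sq.2 + 1)) := by
  simp only [pvA_sq, pvInd, List.foldl]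
  split_ifs <;> ring

lemma pv_map_sub_sum (plot : List (Int × Int)) (f : Int × Int → Int) :
    (plot.map (fun s => 4 - f s)).sum = 4 * (plot.length : Int) - (plot.map f).sum := by
  induction plot with
  | nil => simp
  | cons h t ih => simp [ih]; ring

lemma pvA_plot_eq (plot : List (Int × Int)) :
    pvA_plot plot = 4 * (plot.length : Int) -
      (plot.map (fun s => pvInd plot (s.1 - 1, s.2) + pvInd plot (s.1 + 1, s.2)
          + pvInd plot (s.1, s.2 - 1) + pvInd plot (s.1, s.2 + 1))).sum := by
  unfold pvA_plot
  rw [PySem.List.foldl_add, zero_add]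
  rw [List.map_congr_left (fun s _ => pvA_sq_eq plot s)]
  rw [pv_map_sub_sum]

lemma pv_sum_nodup (plot : List (Int × Int)) (h : plot.Nodup) (f : Int × Int → Int) :
    (plot.map f).sum = ∑ s ∈ plot.toFinset, f s := by
  rw [List.sum_toFinset _ h]

lemma pvB_shared_eq (plot : List (Int × Int)) :
    pvB_shared (PySem.Set.ofList plot) =
      ∑ s ∈ plot.toFinset,
        (pvInd plot (s.1 + 1, s.2) + pvInd plot (s.1, s.2 + 1)) := by
  unfold pvB_shared
  rw [List.foldl_ext _ (fun sh s => sh + (pvInd plot (s.1 + 1, s.2) + pvInd plot (s.1, s.2 + 1)))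
      0 (fun a x hx => by
        have h1 : PySem.Set.contains (PySem.Set.ofList plot) (x.1 + 1, x.2)
            = decide ((x.1 + 1, x.2) ∈ plot) := by
          simp [pysem]
        have h2 : PySem.Set.contains (PySem.Set.ofList plot) (x.1, x.2 + 1)
            = decide ((x.1, x.2 + 1) ∈ plot) := by
          simp [pysem]
        simp only [h1, h2, pvInd]
        split_ifs <;> simp_all <;> ring)]
  rw [PySem.List.foldl_add, zero_add]
  rw [← List.sum_toFinset _ (PySem.Set.nodup_ofList plot)]
  rw [show (PySem.Set.ofList plot).toFinset = plot.toFinset by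
        ext t; simp [pysem]]

-- reindexing: summing 'my upper neighbour is present' over the distinct squares equals
-- summing 'my lower neighbour is present', and likewise left/right
lemma pv_shift_up (S : Finset (Int × Int)) :
    (∑ s ∈ S, if (s.1 - 1, s.2) ∈ S then (1 : Int) else 0)
      = ∑ t ∈ S, if (t.1 + 1, t.2) ∈ S then (1 : Int) else 0 := by
  rw [← Finset.sum_filter, ← Finset.sum_filter]
  apply Finset.sum_nbij' (i := fun s => (s.1 - 1, s.2)) (j := fun t => (t.1 + 1, t.2)) <;>
    intro x hx <;> simp_all [Finset.mem_filter]

lemma pv_shift_left (S : Finset (Int × Int)) :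
    (∑ s ∈ S, if (s.1, s.2 - 1) ∈ S then (1 : Int) else 0)
      = ∑ t ∈ S, if (t.1, t.2 + 1) ∈ S then (1 : Int) else 0 := by
  rw [← Finset.sum_filter, ← Finset.sum_filter]
  apply Finset.sum_nbij' (i := fun s => (s.1, s.2 - 1)) (j := fun t => (t.1, t.2 + 1)) <;>
    intro x hx <;> simp_all [Finset.mem_filter]

-- per plot (no duplicate squares): A's summed per-square perimeter is B's 4*area - 2*shared
lemma pv_plot_key (plot : List (Int × Int)) (h : plot.Nodup) :
    pvA_plot plot = 4 * (plot.length : Int) - 2 * pvB_shared (PySem.Set.ofList plot) := by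
  rw [pvA_plot_eq, pvB_shared_eq, pv_sum_nodup plot h]
  have hmem : ∀ t, (t ∈ plot.toFinset) = (t ∈ plot) := by
    intro t; simp
  have hind : ∀ t : Int × Int, pvInd plot t = if t ∈ plot.toFinset then (1 : Int) else 0 := by
    intro t; simp [pvInd]
  simp only [hind]
  rw [Finset.sum_add_distrib, Finset.sum_add_distrib, Finset.sum_add_distrib,
      Finset.sum_add_distrib, pv_shift_up plot.toFinset, pv_shift_left plot.toFinset]
  ring

-- ===== VERDICT =====
theorem calculate_fence_price_of_spec : Claim_equal_calculate_fence_price_of := by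
  intro plots _ hpre
  unfold Spec_calculate_fence_price_of calculate_fence_price_of calculate_fence_price_of_alt
  apply PySem.List.foldl_congr_mem
  intro acc plot hmem
  show acc + pvA_plot plot * (plot.length : Int)
      = acc + (4 * (plot.length : Int) - 2 * pvB_shared (PySem.Set.ofList plot)) * (plot.length : Int)
  rw [pv_plot_key plot (hpre plot hmem)]
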